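-- pv_equiv track=rewrite | github.com/Mxy0331/NPlasmid-seq | contam_detect/scripts/FromSamExtract.py | read_nw_result
-- ===== SOURCE A (Python) =====
-- def read_nw_result(clustal_result):
--     count_equal = 0  # 计算比例，求的是对上的总数
--     seq_20_nt = clustal_result[1].replace("*", "N")
--     count_20_ = 0
--     count_continuous = 0  # 记录连续对上几个
--     count_continuous_max = 0  # 记录连续对上的最大值
--     seq_20_start, seq_20_end = 0, 0
--     for cl in range(len(seq_20_nt)):
--         if seq_20_nt[cl] != "N":
--             count_20_ += 1
--             if count_20_ == 1:
--                 seq_20_start = cl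
--             if count_20_ == 20:
--                 seq_20_end = cl
--                 break
--     equal_list = []  # 记录所有连续比对个数
--     for cll in range(seq_20_start, seq_20_end + 1):  # 只计算那20独特碱基的比对，不看sgRNA公共部分
--         if clustal_result[0][cll] == clustal_result[1][cll]:
--             count_continuous += 1
--
--             if count_continuous_max < count_continuous:
--                 count_continuous_max = count_continuous
--             count_equal += 1
--         else:
--             equal_list.append(count_continuous)
--             count_continuous = 0
--     equal_list.append(count_continuous)
--     return seq_20_start, seq_20_end, equal_list, count_continuous_max, count_equal
-- ===== SOURCE B (Python) =====
-- def read_nw_result(clustal_result):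
--     s0 = clustal_result[0]
--     s1 = clustal_result[1]
--     seq_20_nt = s1.replace("*", "N")
--     pos = [i for i, c in enumerate(seq_20_nt) if c != "N"]
--     seq_20_start = pos[0] if pos else 0
--     seq_20_end = pos[19] if len(pos) >= 20 else 0
--     mask = "".join(
--         "1" if s0[i] == s1[i] else "0"
--         for i in range(seq_20_start, seq_20_end + 1)
--     )
--     equal_list = [len(run) for run in mask.split("0")]
--     return seq_20_start, seq_20_end, equal_list, max(equal_list), sum(equal_list)
-- ===== Notes on version B (the rewrite author's own statement) =====
-- stated objective: simpler
-- what changed: Phase 2's incremental run-counter/max/total bookkeeping is replaced by building a '1'/'0' match mask over the window, splitting it on '0' to get the run lengths, and taking max/sum of that list; phase-1's start/end scan becomes a positions-list (enumerate+filter) lookup of the 1st and 20th non-N index.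
import Mathlib
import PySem

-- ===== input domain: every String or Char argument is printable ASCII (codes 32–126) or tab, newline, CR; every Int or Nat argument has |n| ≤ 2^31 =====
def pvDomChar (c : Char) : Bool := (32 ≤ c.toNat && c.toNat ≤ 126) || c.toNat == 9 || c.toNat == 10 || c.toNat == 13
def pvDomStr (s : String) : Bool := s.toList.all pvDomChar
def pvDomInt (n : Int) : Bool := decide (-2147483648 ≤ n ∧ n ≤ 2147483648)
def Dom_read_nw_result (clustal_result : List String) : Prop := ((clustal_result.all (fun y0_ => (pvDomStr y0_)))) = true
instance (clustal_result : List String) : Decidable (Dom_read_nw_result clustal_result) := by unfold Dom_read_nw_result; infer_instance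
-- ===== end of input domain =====

-- B replaces A's incremental run-counter/max/total bookkeeping by a build-mask/split-on-'0'/aggregate
-- reduction, and phase-1's scan by a positions-list lookup of the 1st and 20th non-N index (objective: simpler).

-- ===== PORT A =====
-- phase 1: 'for cl in range(len(seq_20_nt)): …' with the count_20_/seq_20_start/seq_20_end state and the break at 20
def pvA_scan : List Char → Int → Int → Int → Int → Int × Int
  | [], _, _, st, en => (st, en)
  | c :: rest, idx, cnt, st, en =>
    if c ≠ 'N' then
      let cnt' := cnt + 1
      let st' := if cnt' = 1 then idx else st
      if cnt' = 20 then (st', idx)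
      else pvA_scan rest (idx + 1) cnt' st' en
    else pvA_scan rest (idx + 1) cnt st en

-- phase 2: 'for cll in range(seq_20_start, seq_20_end+1): …' plus the final equal_list.append(count_continuous).
-- Indexing ported with pyGet?; out-of-range (Python IndexError) is excluded by Pre_read_nw_result.
def pvA_loop2 : List Int → List Char → List Char → Int → Int → Int → List Int → List Int × Int × Int
  | [], _, _, cc, cm, ce, el => (el ++ [cc], cm, ce)
  | i :: rest, s0, s1, cc, cm, ce, el =>
    if PySem.List.pyGet? s0 i = PySem.List.pyGet? s1 i then
      let cc' := cc + 1
      let cm' := if cm < cc' then cc' else cm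
      pvA_loop2 rest s0 s1 cc' cm' (ce + 1) el
    else pvA_loop2 rest s0 s1 0 cm ce (el ++ [cc])

def read_nw_result (clustal_result : List String) : Int × Int × List Int × Int × Int :=
  let s1 := (PySem.List.pyGet? clustal_result 1).getD ""        -- clustal_result[1]; in range under Pre_
  let seq20 := (PySem.Str.replace s1 "*" "N").toList
  let se := pvA_scan seq20 0 0 0 0
  let s0 := ((PySem.List.pyGet? clustal_result 0).getD "").toList
  let r := pvA_loop2 (PySem.List.pyRange se.1 (se.2 + 1) 1) s0 s1.toList 0 0 0 []
  (se.1, se.2, r.1, r.2.1, r.2.2)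

-- ===== PORT B =====
-- pos = [i for i, c in enumerate(seq_20_nt) if c != "N"]
def pvB_pos (s : List Char) : List Int :=
  ((PySem.List.enumerate s 0).filter (fun p => p.2 ≠ 'N')).map (·.1)

-- mask.split("0") : exact hand port of Python str.split for the single-character separator '0'
def pvB_split0 : List Char → List (List Char)
  | [] => [[]]
  | c :: rest =>
    match pvB_split0 rest with
    | [] => [[]]                     -- unreachable: pvB_split0 never returns []
    | h :: t => if c = '0' then [] :: h :: t else (c :: h) :: t

def read_nw_result_alt (clustal_result : List String) : Int × Int × List Int × Int × Int :=
  let s0 := ((PySem.List.pyGet? clustal_result 0).getD "").toList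
  let s1 := (PySem.List.pyGet? clustal_result 1).getD ""
  let seq20 := (PySem.Str.replace s1 "*" "N").toList
  let pos := pvB_pos seq20
  let st := pos.headD 0                                        -- pos[0] if pos else 0
  let en := if 20 ≤ pos.length then pos[19]?.getD 0 else 0     -- pos[19] if len(pos) >= 20 else 0
  let mask := (PySem.List.pyRange st (en + 1) 1).map
      (fun i => if PySem.List.pyGet? s0 i = PySem.List.pyGet? s1.toList i then '1' else '0')
  let el := (pvB_split0 mask).map (fun r => (r.length : Int))
  (st, en, el, (PySem.List.max? el (fun y => y)).getD 0, el.sum)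

-- ===== PRECONDITION & SPEC =====
-- helper for Pre_ only (independent of the ports): indices of the non-N characters
def pvPrePos (s : List Char) : List Int :=
  ((PySem.List.enumerate s 0).filter (fun p => p.2 ≠ 'N')).map (·.1)

-- Pre_ = exactly the inputs where Python A returns (no IndexError): at least two rows, and whenever the
-- 20-nt window range(start, end+1) is nonempty, both rows extend past its last index.
def Pre_read_nw_result (clustal_result : List String) : Prop :=
  2 ≤ clustal_result.length ∧
  (let s1 := (clustal_result[1]?.getD "").toList
   let pos := pvPrePos (PySem.Chars.replace s1 ['*'] ['N'])
   let st := pos.headD 0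
   let en := if 20 ≤ pos.length then pos[19]?.getD 0 else 0
   st ≤ en → ((en < ((clustal_result[0]?.getD "").length : Int)) ∧ en < (s1.length : Int)))
instance (clustal_result : List String) : Decidable (Pre_read_nw_result clustal_result) := by
  unfold Pre_read_nw_result; infer_instance

def pvWitness_read_nw_result : List String := ["AB", "CD"]

def Spec_read_nw_result (clustal_result : List String) (out : Int × Int × List Int × Int × Int) : Prop := out = read_nw_result_alt clustal_result
instance (clustal_result : List String) (out : Int × Int × List Int × Int × Int) : Decidable (Spec_read_nw_result clustal_result out) := by unfold Spec_read_nw_result; infer_instance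

-- ===== CLAIM (what is proved, stated in full; the proofs are below) =====
def Claim_equal_read_nw_result : Prop := ∀ (clustal_result : List String), Dom_read_nw_result clustal_result → Pre_read_nw_result clustal_result → Spec_read_nw_result clustal_result (read_nw_result clustal_result)

-- ===== LEMMAS AND PROOFS =====

-- indices of the non-N characters of s, positions counted from idx
def pvPosFrom (s : List Char) (idx : Int) : List Int :=
  ((PySem.List.enumerate s idx).filter (fun p => p.2 ≠ 'N')).map (·.1)

lemma pvPosFrom_nil (idx : Int) : pvPosFrom [] idx = [] := by
  simp [pvPosFrom, PySem.List.enumerate_nil]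

lemma pvPosFrom_cons (c : Char) (s : List Char) (idx : Int) :
    pvPosFrom (c :: s) idx =
      if c ≠ 'N' then idx :: pvPosFrom s (idx + 1) else pvPosFrom s (idx + 1) := by
  by_cases h : c = 'N' <;> simp [pvPosFrom, PySem.List.enumerate_cons, h]

-- phase-1 characterisation: A's scan returns the 1st and 20th non-N positions (with defaults)
lemma pvA_scan_eq (s : List Char) (idx st en : Int) (k : Nat) (hk : k < 20) :
    pvA_scan s idx (k : Int) st en =
      ((if k = 0 then (pvPosFrom s idx).headD st else st),
       (if 20 ≤ (pvPosFrom s idx).length + k then ((pvPosFrom s idx)[19 - k]?).getD en else en)) := by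
  induction s generalizing idx st en k with
  | nil =>
    have h : ¬ 20 ≤ 0 + k := by omega
    simp [pvA_scan, pvPosFrom_nil]
  | cons c rest ih =>
    rw [pvPosFrom_cons]
    by_cases hc : c = 'N'
    · simpa [pvA_scan, hc] using ih (idx + 1) st en k hk
    · have hcast : (k : Int) + 1 = ((k + 1 : Nat) : Int) := by push_cast; ring
      by_cases h20 : k + 1 = 20
      · have hk19 : k = 19 := by omega
        subst hk19
        simp [pvA_scan, hc]
      · have hne20 : ¬ ((k : Int) + 1 = 20) := by omega
        have hk' : k + 1 < 20 := by omega
        simp only [pvA_scan, hc, ne_eq, not_false_eq_true, if_true, hne20, if_false]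
        rw [hcast, ih (idx + 1) _ en (k + 1) hk']
        have hk10 : ¬ (k + 1 = 0) := by omega
        refine Prod.ext ?_ ?_
        · simp only [hk10, if_false]
          by_cases hk0 : k = 0
          · simp [hk0]
          · simp [hk0]
        · simp only []
          split_ifs with hA hB hB
          · rw [show 19 - k = (19 - (k + 1)) + 1 from by omega, List.getElem?_cons_succ]
          · exfalso; simp [List.length_cons] at hA hB; omega
          · exfalso; simp [List.length_cons] at hA hB; omega
          · rfl

def pvMaskChar (s0 s1 : List Char) (i : Int) : Char :=
  if PySem.List.pyGet? s0 i = PySem.List.pyGet? s1 i then '1' else '0'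

-- A's phase-2 loop only looks at whether each window position matches: it is a fold over the mask
def pvMaskFold : List Char → Int → Int → Int → List Int → List Int × Int × Int
  | [], cc, cm, ce, el => (el ++ [cc], cm, ce)
  | ch :: rest, cc, cm, ce, el =>
    if ch = '1' then pvMaskFold rest (cc + 1) (if cm < cc + 1 then cc + 1 else cm) (ce + 1) el
    else pvMaskFold rest 0 cm ce (el ++ [cc])

lemma pvA_loop2_eq_maskFold (idxs : List Int) (s0 s1 : List Char) (cc cm ce : Int) (el : List Int) :
    pvA_loop2 idxs s0 s1 cc cm ce el = pvMaskFold (idxs.map (pvMaskChar s0 s1)) cc cm ce el := by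
  induction idxs generalizing cc cm ce el with
  | nil => rfl
  | cons i rest ih =>
    simp only [List.map_cons, pvA_loop2, pvMaskFold, pvMaskChar]
    by_cases h : PySem.List.pyGet? s0 i = PySem.List.pyGet? s1 i
    · simp [h, ih]
    · simp [h, ih]

def pvLens (m : List Char) : List Int := (pvB_split0 m).map (fun r => (r.length : Int))

lemma pvB_split0_ne_nil (m : List Char) : pvB_split0 m ≠ [] := by
  cases m with
  | nil => simp [pvB_split0]
  | cons c rest =>
    simp only [pvB_split0]
    cases pvB_split0 rest with
    | nil => simp
    | cons h t => by_cases hc : c = '0' <;> simp [hc]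

lemma pvLens_ne_nil (m : List Char) : pvLens m ≠ [] := by
  simp [pvLens, pvB_split0_ne_nil m]

lemma pvLens_nil : pvLens [] = [0] := by simp [pvLens, pvB_split0]

lemma pvLens_cons_zero (m : List Char) : pvLens ('0' :: m) = 0 :: pvLens m := by
  obtain ⟨h, t, hm⟩ := List.exists_cons_of_ne_nil (pvB_split0_ne_nil m)
  simp [pvLens, pvB_split0, hm]

lemma pvLens_cons_one (m : List Char) :
    pvLens ('1' :: m) = (1 + (pvLens m).headD 0) :: (pvLens m).tail := by
  obtain ⟨h, t, hm⟩ := List.exists_cons_of_ne_nil (pvB_split0_ne_nil m)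
  simp [pvLens, pvB_split0, hm]
  ring

lemma pvLens_head_nonneg (m : List Char) : 0 ≤ (pvLens m).headD 0 := by
  obtain ⟨h, t, hm⟩ := List.exists_cons_of_ne_nil (pvB_split0_ne_nil m)
  simp [pvLens, hm]

-- the run-length aggregation: the incremental fold equals split-then-aggregate
lemma pvMaskFold_eq (m : List Char) (hm : ∀ c ∈ m, c = '1' ∨ c = '0')
    (cc cm ce : Int) (el : List Int) (h0 : 0 ≤ cc) (hle : cc ≤ cm) :
    pvMaskFold m cc cm ce el =
      (el ++ (cc + (pvLens m).headD 0) :: (pvLens m).tail,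
       ((cc + (pvLens m).headD 0) :: (pvLens m).tail).foldl max cm,
       ce + (pvLens m).sum) := by
  induction m generalizing cc cm ce el with
  | nil =>
    simp [pvMaskFold, pvLens_nil]
    omega
  | cons ch rest ih =>
    have hrest : ∀ c ∈ rest, c = '1' ∨ c = '0' := fun c hc => hm c (List.mem_cons_of_mem _ hc)
    obtain ⟨h, t, hL⟩ := List.exists_cons_of_ne_nil (pvLens_ne_nil rest)
    have hhead : (pvLens rest).headD 0 = h := by rw [hL]; rfl
    have htail : (pvLens rest).tail = t := by rw [hL]; rfl
    have hh0 : 0 ≤ h := by rw [← hhead]; exact pvLens_head_nonneg rest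
    rcases hm ch (List.mem_cons_self) with h1 | h01
    · subst h1
      simp only [pvMaskFold]
      rw [ih hrest (cc + 1) _ (ce + 1) el (by omega) (by split_ifs with hw <;> omega)]
      rw [pvLens_cons_one, hhead, htail]
      simp only [List.headD_cons, List.tail_cons, if_true]
      simp only [Prod.mk.injEq]
      refine ⟨?_, ?_, ?_⟩
      · have hadd : cc + 1 + h = cc + (1 + h) := by ring
        rw [hadd]
      · simp only [List.foldl_cons]
        congr 1
        split_ifs with hw <;> omega
      · rw [hL]
        simp only [List.sum_cons]
        ring
    · subst h01
      simp only [pvMaskFold]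
      norm_num
      rw [ih hrest 0 cm ce (el ++ [cc]) le_rfl (le_trans h0 hle)]
      rw [pvLens_cons_zero, hhead, htail, hL]
      rw [if_neg (by decide)]
      simp only [Prod.mk.injEq]
      refine ⟨?_, ?_, ?_⟩
      · simp
      · simp only [List.head?_cons, Option.getD_some, List.tail_cons,
          List.foldl_cons, zero_add, add_zero]
        congr 1
        omega
      · simp
-- phase 1 agreement, specialised to the ports' initial state
lemma pvScan_agree (s : List Char) :
    pvA_scan s 0 0 0 0 =
      ((pvB_pos s).headD 0,
       if 20 ≤ (pvB_pos s).length then (pvB_pos s)[19]?.getD 0 else 0) := by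
  have h := pvA_scan_eq s 0 0 0 0 (by omega)
  have h0 : ((0 : Nat) : Int) = (0 : Int) := rfl
  rw [h0] at h
  rw [h]
  have hposeq : pvPosFrom s 0 = pvB_pos s := rfl
  simp [hposeq]

-- phase 2 agreement, specialised to the ports' initial state
lemma pvLoop_agree (s0 s1 : List Char) (st en : Int) :
    pvA_loop2 (PySem.List.pyRange st (en + 1) 1) s0 s1 0 0 0 [] =
      ((pvB_split0 ((PySem.List.pyRange st (en + 1) 1).map
          (fun i => if PySem.List.pyGet? s0 i = PySem.List.pyGet? s1 i then '1' else '0'))).map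
            (fun r => (r.length : Int)),
       (PySem.List.max? ((pvB_split0 ((PySem.List.pyRange st (en + 1) 1).map
          (fun i => if PySem.List.pyGet? s0 i = PySem.List.pyGet? s1 i then '1' else '0'))).map
            (fun r => (r.length : Int))) (fun y => y)).getD 0,
       ((pvB_split0 ((PySem.List.pyRange st (en + 1) 1).map
          (fun i => if PySem.List.pyGet? s0 i = PySem.List.pyGet? s1 i then '1' else '0'))).map
            (fun r => (r.length : Int))).sum) := by
  rw [pvA_loop2_eq_maskFold]
  have hmask : (PySem.List.pyRange st (en + 1) 1).map (pvMaskChar s0 s1) =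
      (PySem.List.pyRange st (en + 1) 1).map
        (fun i => if PySem.List.pyGet? s0 i = PySem.List.pyGet? s1 i then '1' else '0') := rfl
  rw [hmask]
  set m := (PySem.List.pyRange st (en + 1) 1).map
      (fun i => if PySem.List.pyGet? s0 i = PySem.List.pyGet? s1 i then '1' else '0') with hmdef
  have hm : ∀ c ∈ m, c = '1' ∨ c = '0' := by
    intro c hc
    rcases List.mem_map.mp hc with ⟨i, _, rfl⟩
    split_ifs <;> simp
  rw [pvMaskFold_eq m hm 0 0 0 [] le_rfl le_rfl]
  obtain ⟨h, t, hL⟩ := List.exists_cons_of_ne_nil (pvLens_ne_nil m)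
  have hh0 : 0 ≤ h := by
    have := pvLens_head_nonneg m
    rw [hL] at this
    simpa using this
  have hel : (pvB_split0 m).map (fun r => (r.length : Int)) = pvLens m := rfl
  rw [hel, hL]
  simp only [List.headD_cons, List.tail_cons, List.nil_append, zero_add,
    PySem.List.max?_id_cons, Option.getD_some, List.foldl_cons]
  refine Prod.ext rfl (Prod.ext ?_ rfl)
  have hmax : max 0 h = h := by omega
  rw [hmax]

theorem read_nw_result_spec : Claim_equal_read_nw_result := by
  intro cl _ _
  unfold Spec_read_nw_result
  unfold read_nw_result read_nw_result_alt
  dsimp only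
  rw [pvScan_agree]
  rw [pvLoop_agree]
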